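-- pv_equiv track=rewrite | github.com/MaromSv/Virtual-Trainer | Webserver/app.py | experience_preference_to_bool
-- ===== SOURCE A (Python) =====
-- def experience_preference_to_bool(experience_preference):
--     experience_preference = experience_preference.split(",")
--     experience_preference_bool = [False,False,False]
--     for i in experience_preference:
--         if i == "Beginner":
--             experience_preference_bool[0] = True
--         elif i == "Intermediate":
--             experience_preference_bool[1] = True
--         elif i == "Advanced":
--             experience_preference_bool[2] = True
--     return experience_preference_bool
-- ===== SOURCE B (Python) =====
-- def experience_preference_to_bool(experience_preference):
--     # Recursive descent over the string itself: peel one comma-separated token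
--     # with str.partition, flag it, and OR with the flags of the remainder.
--     head, sep, tail = experience_preference.partition(",")
--     flags = [head == "Beginner", head == "Intermediate", head == "Advanced"]
--     if not sep:
--         return flags
--     rest = experience_preference_to_bool(tail)
--     return [x or y for x, y in zip(flags, rest)]
-- ===== Notes on version B (the rewrite author's own statement) =====
-- stated objective: alternative
-- what changed: Replaced A's split-then-iterate flag-mutation loop by a recursion on the string itself: str.partition peels one token at a time and the three flags of the head token are OR-combined element-wise with the recursively computed flags of the remainder (no split call, no mutation).
import Mathlib
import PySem

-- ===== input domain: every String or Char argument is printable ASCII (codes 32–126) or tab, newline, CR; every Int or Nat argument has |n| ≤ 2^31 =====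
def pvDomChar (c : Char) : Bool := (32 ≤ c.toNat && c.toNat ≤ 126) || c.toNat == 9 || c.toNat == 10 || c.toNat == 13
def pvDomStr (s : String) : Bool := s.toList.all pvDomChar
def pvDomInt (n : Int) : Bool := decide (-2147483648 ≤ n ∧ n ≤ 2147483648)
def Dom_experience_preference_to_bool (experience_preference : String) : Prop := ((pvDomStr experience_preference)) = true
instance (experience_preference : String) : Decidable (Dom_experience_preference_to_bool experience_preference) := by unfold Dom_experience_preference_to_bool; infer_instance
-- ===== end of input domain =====

-- B replaces A's split-then-iterate flag loop by a recursion on the string itself: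
-- partition peels one token, its flags are OR-combined with the remainder's (alternative decomposition, same cost).

-- ===== PORT A =====
-- A: split on "," then loop over the tokens mutating the three flags in order;
-- [False,False,False] is the (false,false,false) start state.
def experience_preference_to_bool (experience_preference : String) : List Bool :=
  let parts := (PySem.Str.split? experience_preference ",").getD []
  let st := parts.foldl (fun (st : Bool × Bool × Bool) i =>
    if i = "Beginner" then (true, st.2.1, st.2.2)
    else if i = "Intermediate" then (st.1, true, st.2.2)
    else if i = "Advanced" then (st.1, st.2.1, true)
    else st) (false, false, false)
  [st.1, st.2.1, st.2.2]

-- ===== PORT B =====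
-- head, sep, tail = s.partition(","): the tokens before the first ',' and, if a ',' was found, the rest.
def pvPartComma (cs : List Char) : List Char × Option (List Char) :=
  (cs.takeWhile (· ≠ ','),
   match cs.dropWhile (· ≠ ',') with
   | [] => none
   | _ :: t => some t)

theorem pvPartComma_snd_length (cs t : List Char) (h : (pvPartComma cs).2 = some t) :
    t.length < cs.length := by
  unfold pvPartComma at h
  simp only at h
  rcases hd : cs.dropWhile (· ≠ ',') with _ | ⟨c, r⟩ <;> rw [hd] at h
  · exact absurd h (by simp)
  · have := List.length_dropWhile_le (p := (· ≠ ',')) (l := cs)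
    rw [hd] at this
    simp only [Option.some.injEq] at h
    subst h
    simp at this
    omega

-- the recursion of Source B: flags of the head token, OR-ed with the flags of the tail
def pvAltRec (cs : List Char) : Bool × Bool × Bool :=
  let p := pvPartComma cs
  let flags : Bool × Bool × Bool :=
    (decide (p.1 = "Beginner".toList), decide (p.1 = "Intermediate".toList),
     decide (p.1 = "Advanced".toList))
  match hp : p.2 with
  | none => flags
  | some t =>
    let r := pvAltRec t
    (flags.1 || r.1, flags.2.1 || r.2.1, flags.2.2 || r.2.2)
termination_by cs.length
decreasing_by exact pvPartComma_snd_length cs t hp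

def experience_preference_to_bool_alt (experience_preference : String) : List Bool :=
  let r := pvAltRec experience_preference.toList
  [r.1, r.2.1, r.2.2]

-- ===== PRECONDITION & SPEC =====
def Spec_experience_preference_to_bool (experience_preference : String) (out : List Bool) : Prop := out = experience_preference_to_bool_alt experience_preference
instance (experience_preference : String) (out : List Bool) : Decidable (Spec_experience_preference_to_bool experience_preference out) := by unfold Spec_experience_preference_to_bool; infer_instance

-- ===== CLAIM (what is proved, stated in full; the proofs are below) =====
def Claim_equal_experience_preference_to_bool : Prop := ∀ (experience_preference : String), Dom_experience_preference_to_bool experience_preference → Spec_experience_preference_to_bool experience_preference (experience_preference_to_bool experience_preference)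

-- ===== LEMMAS AND PROOFS =====

theorem pvPartComma_nil : pvPartComma [] = ([], none) := rfl

theorem pvPartComma_comma (rest : List Char) : pvPartComma (',' :: rest) = ([], some rest) := by
  simp [pvPartComma]

theorem pvPartComma_cons (c : Char) (rest : List Char) (hc : c ≠ ',') :
    pvPartComma (c :: rest) = (c :: (pvPartComma rest).1, (pvPartComma rest).2) := by
  simp [pvPartComma, hc]

theorem pvAltRec_none (cs : List Char) (h : (pvPartComma cs).2 = none) :
    pvAltRec cs = (decide ((pvPartComma cs).1 = "Beginner".toList),
      decide ((pvPartComma cs).1 = "Intermediate".toList),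
      decide ((pvPartComma cs).1 = "Advanced".toList)) := by
  rw [pvAltRec]; split <;> simp_all

theorem pvAltRec_some (cs t : List Char) (h : (pvPartComma cs).2 = some t) :
    pvAltRec cs = (decide ((pvPartComma cs).1 = "Beginner".toList) || (pvAltRec t).1,
      decide ((pvPartComma cs).1 = "Intermediate".toList) || (pvAltRec t).2.1,
      decide ((pvPartComma cs).1 = "Advanced".toList) || (pvAltRec t).2.2) := by
  rw [pvAltRec]; split <;> simp_all

-- the list of comma-separated tokens, by the same head/tail recursion as pvAltRec
def pvSplitComma (cs : List Char) : List (List Char) :=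
  match hp : (pvPartComma cs).2 with
  | none => [(pvPartComma cs).1]
  | some t => (pvPartComma cs).1 :: pvSplitComma t
termination_by cs.length
decreasing_by exact pvPartComma_snd_length cs t hp

theorem pvSplitComma_none (cs : List Char) (h : (pvPartComma cs).2 = none) :
    pvSplitComma cs = [(pvPartComma cs).1] := by
  rw [pvSplitComma]; split <;> simp_all

theorem pvSplitComma_some (cs t : List Char) (h : (pvPartComma cs).2 = some t) :
    pvSplitComma cs = (pvPartComma cs).1 :: pvSplitComma t := by
  rw [pvSplitComma]; split <;> simp_all

theorem pvSplitComma_ne_nil (cs : List Char) : pvSplitComma cs ≠ [] := by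
  rw [pvSplitComma]; split <;> simp

theorem pvSplitComma_cons_of_ne (c : Char) (rest : List Char) (hc : c ≠ ',') :
    pvSplitComma (c :: rest) = (c :: (pvSplitComma rest).headI) :: (pvSplitComma rest).tail := by
  rcases hp : (pvPartComma rest).2 with _ | t
  · rw [pvSplitComma_none _ (by rw [pvPartComma_cons c rest hc]; exact hp),
        pvSplitComma_none _ hp, pvPartComma_cons c rest hc]
    simp
  · rw [pvSplitComma_some _ t (by rw [pvPartComma_cons c rest hc]; exact hp),
        pvSplitComma_some _ t hp, pvPartComma_cons c rest hc]
    simp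

-- the tail-recursive worker of PySem.Chars.splitOn, specialised to sep = [','], in direct style
theorem pv_go_spec (fuel : Nat) (l cur : List Char) (acc : List (List Char))
    (hf : l.length < fuel) :
    PySem.Chars.splitOn.go [','] fuel l cur acc =
      acc.reverse ++ ((cur.reverse ++ (pvSplitComma l).headI) :: (pvSplitComma l).tail) := by
  induction fuel generalizing l cur acc with
  | zero => omega
  | succ n ih =>
    cases l with
    | nil =>
      rw [pvSplitComma_none [] (by rfl)]
      simp [PySem.Chars.splitOn.go, pvPartComma_nil]
    | cons c rest =>
      rw [PySem.Chars.splitOn.go]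
      by_cases hc : c = ','
      · subst hc
        have hpre : List.isPrefixOf [','] (',' :: rest) = true := by simp [List.isPrefixOf]
        rw [if_pos hpre]
        have hrec := ih rest [] (cur.reverse :: acc) (by simp at hf ⊢; omega)
        simp only [List.length_cons, List.length_nil, List.drop_succ_cons, List.drop_zero] at hrec ⊢
        rw [hrec, pvSplitComma_some (',' :: rest) rest (by rw [pvPartComma_comma]),
            pvPartComma_comma]
        rcases h2 : pvSplitComma rest with _ | ⟨x, xs⟩
        · exact absurd h2 (pvSplitComma_ne_nil rest)
        · simp
      · have hpre : List.isPrefixOf [','] (c :: rest) = false := by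
          simp [List.isPrefixOf, beq_eq_false_iff_ne]
          exact fun h => absurd h.symm hc
        rw [if_neg (by simp [hpre])]
        have hrec := ih rest (c :: cur) acc (by simp at hf ⊢; omega)
        rw [hrec, pvSplitComma_cons_of_ne c rest hc]
        simp

theorem pv_splitOn_comma (cs : List Char) :
    PySem.Chars.splitOn cs [','] = pvSplitComma cs := by
  have h := pv_go_spec (cs.length + 1) cs [] [] (by omega)
  simp only [List.reverse_nil, List.nil_append] at h
  rw [PySem.Chars.splitOn, h]
  rcases h2 : pvSplitComma cs with _ | ⟨x, xs⟩
  · exact absurd h2 (pvSplitComma_ne_nil cs)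
  · simp

-- one step of A's flag-setting loop, as three ORs
theorem pv_step (st : Bool × Bool × Bool) (i : List Char) :
    (if i = "Beginner".toList then (true, st.2.1, st.2.2)
     else if i = "Intermediate".toList then (st.1, true, st.2.2)
     else if i = "Advanced".toList then (st.1, st.2.1, true)
     else st)
    = (st.1 || decide (i = "Beginner".toList), st.2.1 || decide (i = "Intermediate".toList),
       st.2.2 || decide (i = "Advanced".toList)) := by
  split_ifs <;> simp_all

-- A's flag-setting fold over the token list equals OR-ing the start state with B's recursive flags
theorem pv_fold_eq_altRec (cs : List Char) (a b c : Bool) :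
    (pvSplitComma cs).foldl (fun (st : Bool × Bool × Bool) i =>
      if i = "Beginner".toList then (true, st.2.1, st.2.2)
      else if i = "Intermediate".toList then (st.1, true, st.2.2)
      else if i = "Advanced".toList then (st.1, st.2.1, true)
      else st) (a, b, c)
    = (a || (pvAltRec cs).1, b || (pvAltRec cs).2.1, c || (pvAltRec cs).2.2) := by
  induction hn : cs.length using Nat.strong_induction_on generalizing cs a b c with
  | _ n ih =>
    rcases hp : (pvPartComma cs).2 with _ | t
    · rw [pvSplitComma_none cs hp, pvAltRec_none cs hp]
      simp only [List.foldl_cons, List.foldl_nil]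
      exact pv_step (a, b, c) _
    · have hlt := pvPartComma_snd_length cs t hp
      rw [pvSplitComma_some cs t hp, pvAltRec_some cs t hp]
      simp only [List.foldl_cons]
      rw [pv_step (a, b, c) (pvPartComma cs).1, ih t.length (by omega) t _ _ _ rfl]
      simp [Bool.or_assoc]

-- ===== VERDICT (by name: the statement is the Claim_ definition above) =====
theorem experience_preference_to_bool_spec : Claim_equal_experience_preference_to_bool := by
  intro s _
  unfold Spec_experience_preference_to_bool experience_preference_to_bool experience_preference_to_bool_alt
  have hb := PySem.Str.split?_map s ","
  rcases hs : PySem.Str.split? s "," with _ | parts <;> rw [hs] at hb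
  · simp [PySem.Chars.split?] at hb
  · simp only [Option.map_some, PySem.Chars.split?, List.isEmpty_iff] at hb
    rw [if_neg (by simp)] at hb
    simp only [Option.some.injEq] at hb
    simp only [Option.getD_some]
    have hfold : parts.foldl (fun (st : Bool × Bool × Bool) i =>
        if i = "Beginner" then (true, st.2.1, st.2.2)
        else if i = "Intermediate" then (st.1, true, st.2.2)
        else if i = "Advanced" then (st.1, st.2.1, true)
        else st) (false, false, false)
      = (parts.map String.toList).foldl (fun (st : Bool × Bool × Bool) i =>
        if i = "Beginner".toList then (true, st.2.1, st.2.2)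
        else if i = "Intermediate".toList then (st.1, true, st.2.2)
        else if i = "Advanced".toList then (st.1, st.2.1, true)
        else st) (false, false, false) := by
      rw [List.foldl_map]
      congr 1
      funext st p
      simp only [← String.toList_inj]
    rw [hfold, hb]
    have hsep : (",".toList : List Char) = [','] := rfl
    rw [hsep, pv_splitOn_comma, pv_fold_eq_altRec]
    simp
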